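-- pv_equiv track=rewrite | github.com/nlpcui/AdaptiveQG | data.py | __build_word_attn_mask
-- ===== SOURCE A (Python) =====
-- def __build_word_attn_mask(data):
--     seq_len = len(data['word_ids'])
--     word_attn_mask = [[True for i in range(seq_len)] for j in range(seq_len)]
--
--     for target_idx in range(seq_len):  # row
--         for source_idx in range(seq_len):  # column
--             if data['interaction_ids'][target_idx] == data['interaction_ids'][source_idx]:
--                 word_attn_mask[target_idx][source_idx] = False
--                 # (1) special_tokens attend to special tokens, and (2) words attend within the same interaction
--             # elif data['interaction_ids'][target_idx] < data['interaction_ids'][source_idx]: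
--             #     break
--
--     return word_attn_mask
-- ===== SOURCE B (Python) =====
-- def __build_word_attn_mask(data):
--     seq_len = len(data['word_ids'])
--     groups = {}
--     for i in range(seq_len):
--         groups.setdefault(data['interaction_ids'][i], []).append(i)
--     mask = [[True] * seq_len for _ in range(seq_len)]
--     for positions in groups.values():
--         for a in positions:
--             row = mask[a]
--             for b in positions:
--                 row[b] = False
--     return mask
-- ===== Notes on version B (the rewrite author's own statement) =====
-- stated objective: alternative
-- what changed: B builds a dict grouping positions by interaction id in one pass and then blanks only the ordered pairs inside each group of an all-True matrix, instead of A's full n x n scan that compares the two ids at every cell.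
import Mathlib
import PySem

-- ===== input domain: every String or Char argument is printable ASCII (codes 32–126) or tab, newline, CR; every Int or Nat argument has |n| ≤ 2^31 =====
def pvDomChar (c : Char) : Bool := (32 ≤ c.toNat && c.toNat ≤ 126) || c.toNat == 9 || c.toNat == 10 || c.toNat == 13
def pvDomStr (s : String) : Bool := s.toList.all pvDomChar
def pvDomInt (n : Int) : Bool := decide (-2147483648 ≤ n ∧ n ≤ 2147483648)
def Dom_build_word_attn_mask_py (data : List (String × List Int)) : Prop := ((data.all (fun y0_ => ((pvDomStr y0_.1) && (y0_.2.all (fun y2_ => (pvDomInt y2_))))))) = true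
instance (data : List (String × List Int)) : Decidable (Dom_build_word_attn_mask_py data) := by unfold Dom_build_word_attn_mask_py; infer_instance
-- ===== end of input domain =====

-- B groups positions by interaction id once and blanks only the pairs inside each group,
-- instead of A's full n×n scan comparing ids for every cell (objective: alternative decomposition).

-- ===== PORT A =====
-- Literal port of A's double loop over range(seq_len) with an id comparison per cell.
-- Inputs where Python raises (KeyError / IndexError) are excluded by Pre_; the `.getD`
-- defaults below are only reached outside Pre_. `t`, `s` come from range so are ≥ 0 and
-- `< seq_len`, hence `.toNat` is exact and the assignment is in range.
def build_word_attn_mask_py (data : List (String × List Int)) : List (List Bool) :=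
  let word_ids := ((PySem.Dict.mk data).get? "word_ids").getD []            -- data['word_ids']
  let seq_len : Int := word_ids.length
  let mask0 := (PySem.List.pyRange 0 seq_len 1).map
      (fun _ => (PySem.List.pyRange 0 seq_len 1).map (fun _ => true))
  (PySem.List.pyRange 0 seq_len 1).foldl (fun m t =>
    (PySem.List.pyRange 0 seq_len 1).foldl (fun m s =>
      if PySem.List.pyGet? (((PySem.Dict.mk data).get? "interaction_ids").getD []) t ==
         PySem.List.pyGet? (((PySem.Dict.mk data).get? "interaction_ids").getD []) s then
        m.modify t.toNat (fun row => row.set s.toNat false)                 -- mask[t][s] = False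
      else m) m) mask0

-- ===== PORT B =====
-- Literal port of Source B: build groups[id] = positions with that interaction id via
-- setdefault/append (= Dict.modify with default []), then blank every ordered pair inside
-- each group. `(….pyGet? i).getD 0` is data['interaction_ids'][i]; under Pre_ the lookup is
-- always `some`, so the default is never used.
def build_word_attn_mask_py_alt (data : List (String × List Int)) : List (List Bool) :=
  let word_ids := ((PySem.Dict.mk data).get? "word_ids").getD []
  let seq_len : Int := word_ids.length
  let ids := ((PySem.Dict.mk data).get? "interaction_ids").getD []
  let groups : PySem.Dict Int (List Int) :=
    (PySem.List.pyRange 0 seq_len 1).foldl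
      (fun g i => g.modify ((PySem.List.pyGet? ids i).getD 0) [] (fun l => l ++ [i]))
      PySem.Dict.empty
  let mask0 := (PySem.List.pyRange 0 seq_len 1).map
      (fun _ => List.replicate seq_len.toNat true)                          -- [True] * seq_len
  groups.values.foldl (fun m ps =>
    ps.foldl (fun m a =>
      ps.foldl (fun m b => m.modify a.toNat (fun row => row.set b.toNat false)) m) m) mask0

-- ===== PRECONDITION & SPEC =====
-- Exactly the inputs where the Python A returns: key 'word_ids' present (else KeyError), and —
-- unless seq_len = 0, when the loops never touch it — key 'interaction_ids' present with at
-- least seq_len entries (else KeyError / IndexError).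
def Pre_build_word_attn_mask_py (data : List (String × List Int)) : Prop :=
  (((PySem.Dict.mk data).get? "word_ids").isSome = true) ∧
  (((((PySem.Dict.mk data).get? "word_ids").getD []).length = 0) ∨
    ((((PySem.Dict.mk data).get? "interaction_ids").isSome = true) ∧
     ((((PySem.Dict.mk data).get? "word_ids").getD []).length ≤
      (((PySem.Dict.mk data).get? "interaction_ids").getD []).length)))
instance (data : List (String × List Int)) : Decidable (Pre_build_word_attn_mask_py data) := by
  unfold Pre_build_word_attn_mask_py; infer_instance

def pvWitness_build_word_attn_mask_py : (List (String × List Int)) :=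
  [("word_ids", [10, 11, 12]), ("interaction_ids", [7, 7, 8])]

def Spec_build_word_attn_mask_py (data : List (String × List Int)) (out : List (List Bool)) : Prop := out = build_word_attn_mask_py_alt data
instance (data : List (String × List Int)) (out : List (List Bool)) : Decidable (Spec_build_word_attn_mask_py data out) := by unfold Spec_build_word_attn_mask_py; infer_instance

-- ===== CLAIM (what is proved, stated in full; the proofs are below) =====
def Claim_equal_build_word_attn_mask_py : Prop := ∀ (data : List (String × List Int)), Dom_build_word_attn_mask_py data → Pre_build_word_attn_mask_py data → Spec_build_word_attn_mask_py data (build_word_attn_mask_py data)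

-- ===== LEMMAS AND PROOFS =====

-- Both programs are a sequence of "mask[a][b] = False" writes applied to an all-True matrix;
-- pvApplyF replays such a write list, pvE reads one entry, pvShaped is the n×n shape invariant.
def pvApplyF (m : List (List Bool)) (ps : List (Int × Int)) : List (List Bool) :=
  ps.foldl (fun m p => m.modify p.1.toNat (fun row => row.set p.2.toNat false)) m

def pvE (m : List (List Bool)) (i j : Nat) : Bool := (m.getD i []).getD j true

def pvShaped (m : List (List Bool)) (n : Nat) : Prop :=
  m.length = n ∧ ∀ i : Nat, i < n → (m.getD i []).length = n

theorem pvApplyF_append (m : List (List Bool)) (xs ys : List (Int × Int)) :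
    pvApplyF m (xs ++ ys) = pvApplyF (pvApplyF m xs) ys := by
  simp [pvApplyF, List.foldl_append]

-- the inner `for s: if c s: mask[t][s] = False` loop is a write list
theorem pv_inner_eq (l : List Int) (c : Int → Bool) (t : Int) (m : List (List Bool)) :
    l.foldl (fun m s => if c s then m.modify t.toNat (fun row => row.set s.toNat false) else m) m
      = pvApplyF m ((l.filter c).map (fun s => (t, s))) := by
  induction l generalizing m with
  | nil => rfl
  | cons x xs ih =>
    by_cases h : c x = true <;> simp [pvApplyF, h] at ih ⊢ <;> exact ih _

theorem pv_inner_eq_all (l : List Int) (a : Int) (m : List (List Bool)) :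
    l.foldl (fun m b => m.modify a.toNat (fun row => row.set b.toNat false)) m
      = pvApplyF m (l.map (fun b => (a, b))) := by
  have := pv_inner_eq l (fun _ => true) a m
  simpa using this

-- an outer loop whose body replays a write list replays the concatenation
theorem pv_foldl_applyF {β : Type} (L : List β) (pf : β → List (Int × Int)) (m : List (List Bool)) :
    L.foldl (fun m t => pvApplyF m (pf t)) m = pvApplyF m (L.flatMap pf) := by
  induction L generalizing m with
  | nil => rfl
  | cons x xs ih => simp [List.flatMap_cons, pvApplyF_append, ih]

theorem pvShaped_step (m : List (List Bool)) (n : Nat) (h : pvShaped m n) (a b : Nat) :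
    pvShaped (m.modify a (fun row => row.set b false)) n := by
  obtain ⟨h1, h2⟩ := h
  refine ⟨by simpa using h1, fun i hi => ?_⟩
  have := h2 i hi
  simp only [List.getD_eq_getElem?_getD, List.getElem?_modify] at *
  rcases hm : m[i]? with _ | row
  · simp [hm] at this ⊢; omega
  · simp [hm] at this ⊢
    split <;> simp [this]

theorem pvShaped_applyF (m : List (List Bool)) (n : Nat) (h : pvShaped m n)
    (ps : List (Int × Int)) : pvShaped (pvApplyF m ps) n := by
  induction ps generalizing m with
  | nil => exact h
  | cons p ps ih => exact ih _ (pvShaped_step m n h p.1.toNat p.2.toNat)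

theorem pvE_step (m : List (List Bool)) (n : Nat) (h : pvShaped m n) (a b : Int)
    (ha : 0 ≤ a) (_ha2 : a < (n : Int)) (hb : 0 ≤ b) (_hb2 : b < (n : Int)) (i j : Nat)
    (hi : i < n) (hj : j < n) :
    pvE (m.modify a.toNat (fun row => row.set b.toNat false)) i j
      = if a = (i : Int) ∧ b = (j : Int) then false else pvE m i j := by
  obtain ⟨h1, h2⟩ := h
  have hrow := h2 i hi
  simp only [List.getD_eq_getElem?_getD] at hrow
  simp only [pvE, List.getD_eq_getElem?_getD, List.getElem?_modify]
  rcases hm : m[i]? with _ | row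
  · rw [List.getElem?_eq_none_iff] at hm; omega
  · rw [hm] at hrow
    simp only [hm, Option.map_eq_map, Option.map_some, Option.getD_some] at *
    by_cases hai : a.toNat = i
    · rw [if_pos hai, List.getElem?_set]
      by_cases hbj : b.toNat = j
      · have hc : a = (i : Int) ∧ b = (j : Int) := by omega
        simp [hc, hrow, hj]
      · have hc : ¬(a = (i : Int) ∧ b = (j : Int)) := by omega
        simp [hbj, hc]
    · have hc : ¬(a = (i : Int) ∧ b = (j : Int)) := by omega
      rw [if_neg hai]
      simp [hc]

theorem pvE_applyF (n : Nat) (ps : List (Int × Int))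
    (hps : ∀ p ∈ ps, 0 ≤ p.1 ∧ p.1 < (n : Int) ∧ 0 ≤ p.2 ∧ p.2 < (n : Int))
    (m : List (List Bool)) (h : pvShaped m n) (i j : Nat) (hi : i < n) (hj : j < n) :
    pvE (pvApplyF m ps) i j = (pvE m i j && !decide (((i : Int), (j : Int)) ∈ ps)) := by
  induction ps generalizing m with
  | nil => simp [pvApplyF]
  | cons p ps ih =>
    obtain ⟨hp1, hp2, hp3, hp4⟩ := hps p (List.mem_cons_self ..)
    have hstep := pvE_step m n h p.1 p.2 hp1 hp2 hp3 hp4 i j hi hj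
    have hsh := pvShaped_step m n h p.1.toNat p.2.toNat
    have := ih (fun q hq => hps q (List.mem_cons_of_mem _ hq)) _ hsh
    simp only [pvApplyF, List.foldl_cons] at *
    rw [this, hstep]
    by_cases hpij : p = ((i : Int), (j : Int))
    · simp [hpij]
    · have hc1 : ((i : Int), (j : Int)) ≠ p := fun e => hpij e.symm
      have hc2 : ¬(p.1 = (i : Int) ∧ p.2 = (j : Int)) := fun e => hpij (Prod.ext e.1 e.2)
      simp [hc2, hc1]


-- Proof-side abbreviations for the pieces both ports share.
def pvN (data : List (String × List Int)) : Nat :=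
  (((PySem.Dict.mk data).get? "word_ids").getD []).length

def pvIds (data : List (String × List Int)) : List Int :=
  ((PySem.Dict.mk data).get? "interaction_ids").getD []

def pvR (data : List (String × List Int)) : List Int :=
  PySem.List.pyRange 0 (pvN data) 1

def pvM0 (data : List (String × List Int)) : List (List Bool) :=
  (pvR data).map (fun _ => (pvR data).map (fun _ => true))

def pvPsA (data : List (String × List Int)) : List (Int × Int) :=
  (pvR data).flatMap (fun t =>
    ((pvR data).filter (fun s =>
        PySem.List.pyGet? (pvIds data) t == PySem.List.pyGet? (pvIds data) s)).map (fun s => (t, s)))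

def pvKey (data : List (String × List Int)) (i : Int) : Int :=
  (PySem.List.pyGet? (pvIds data) i).getD 0

def pvGroups (data : List (String × List Int)) : PySem.Dict Int (List Int) :=
  (pvR data).foldl
    (fun g i => g.modify (pvKey data i) [] (fun l => l ++ [i])) PySem.Dict.empty

def pvPsB (data : List (String × List Int)) : List (Int × Int) :=
  (pvGroups data).values.flatMap (fun ps => ps.flatMap (fun a => ps.map (fun b => (a, b))))

theorem pvA_eq (data : List (String × List Int)) :
    build_word_attn_mask_py data = pvApplyF (pvM0 data) (pvPsA data) := by
  unfold build_word_attn_mask_py pvPsA pvM0 pvR pvIds pvN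
  simp only [pv_inner_eq, pv_foldl_applyF]

theorem pvB_eq (data : List (String × List Int)) :
    build_word_attn_mask_py_alt data = pvApplyF (pvM0 data) (pvPsB data) := by
  unfold build_word_attn_mask_py_alt pvPsB pvGroups pvKey pvM0 pvR pvIds pvN
  simp only [pv_inner_eq_all, pv_foldl_applyF]
  congr 1
  simp [List.map_const', PySem.List.length_pyRange_one]

theorem pvShaped_M0 (data : List (String × List Int)) : pvShaped (pvM0 data) (pvN data) := by
  constructor
  · simp [pvM0, pvR, PySem.List.length_pyRange_one]
  · intro i hi
    have : i < (pvR data).length := by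
      simpa [pvR, PySem.List.length_pyRange_one] using hi
    simp [pvM0, List.getD_eq_getElem?_getD, pvR, PySem.List.length_pyRange_one, hi]

theorem pv_memA (data : List (String × List Int)) (x y : Int) :
    ((x, y) ∈ pvPsA data) ↔
      x ∈ pvR data ∧ y ∈ pvR data ∧
      (PySem.List.pyGet? (pvIds data) x == PySem.List.pyGet? (pvIds data) y) = true := by
  simp only [pvPsA, List.mem_flatMap, List.mem_map, List.mem_filter]
  constructor
  · rintro ⟨t, ht, s, ⟨hs, hc⟩, he⟩
    obtain ⟨rfl, rfl⟩ := Prod.mk.injEq .. ▸ he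
    exact ⟨ht, hs, hc⟩
  · rintro ⟨hx, hy, hc⟩
    exact ⟨x, hx, y, ⟨hy, hc⟩, rfl⟩

theorem pv_groups_getD (data : List (String × List Int)) (c : Int) :
    (pvGroups data).getD c [] = (pvR data).filter (fun i => pvKey data i == c) := by
  unfold pvGroups
  have h := PySem.Dict.getD_foldl_modify_append
    ((pvR data).map (fun i => ((pvKey data i), i))) PySem.Dict.empty c
  simp only [List.foldl_map] at h
  rw [h]
  simp [List.filter_map, Function.comp_def]

theorem pv_groups_nodup (data : List (String × List Int)) : (pvGroups data).keys.Nodup := by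
  unfold pvGroups
  exact PySem.Dict.nodup_keys_foldl_modify_key _ (pvKey data) [] (fun _ i l => l ++ [i]) _
    (by simp [PySem.Dict.keys_empty])

theorem pv_groups_keys (data : List (String × List Int)) (k : Int) :
    k ∈ (pvGroups data).keys ↔ ∃ i ∈ pvR data, pvKey data i = k := by
  unfold pvGroups
  rw [PySem.Dict.keys_foldl_modify_key _ (pvKey data) [] (fun _ i l => l ++ [i])]
  rw [PySem.Dict.keys_empty, PySem.Set.update_nil_left, PySem.Set.mem_ofList]
  simp [eq_comm]

theorem pv_memB (data : List (String × List Int)) (x y : Int) :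
    ((x, y) ∈ pvPsB data) ↔
      x ∈ pvR data ∧ y ∈ pvR data ∧ pvKey data x = pvKey data y := by
  unfold pvPsB
  rw [PySem.Dict.values_eq_map_keys _ (pv_groups_nodup data) []]
  simp only [List.mem_flatMap, List.mem_map]
  constructor
  · rintro ⟨ps, ⟨k, hk, rfl⟩, a, ha, b, hb, he⟩
    obtain ⟨rfl, rfl⟩ := Prod.mk.injEq .. ▸ he
    rw [pv_groups_getD] at ha hb
    simp only [List.mem_filter, beq_iff_eq] at ha hb
    exact ⟨ha.1, hb.1, ha.2.trans hb.2.symm⟩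
  · rintro ⟨hx, hy, hk⟩
    refine ⟨(pvGroups data).getD (pvKey data x) [],
      ⟨pvKey data x, (pv_groups_keys data _).mpr ⟨x, hx, rfl⟩, rfl⟩, x, ?_, y, ?_, rfl⟩
    · rw [pv_groups_getD]; simp [List.mem_filter, hx]
    · rw [pv_groups_getD]; simp [List.mem_filter, hy, hk]

theorem pv_mem_iff (data : List (String × List Int))
    (hlen : pvN data ≤ (pvIds data).length) (x y : Int) :
    ((x, y) ∈ pvPsA data) ↔ ((x, y) ∈ pvPsB data) := by
  rw [pv_memA, pv_memB]
  refine and_congr_right fun hx => and_congr_right fun hy => ?_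
  rw [pvR, PySem.List.mem_pyRange_one] at hx hy
  obtain ⟨kx, rfl⟩ : ∃ k : Nat, x = (k : Int) := ⟨x.toNat, Int.eq_natCast_toNat.mpr hx.1⟩
  obtain ⟨ky, rfl⟩ : ∃ k : Nat, y = (k : Int) := ⟨y.toNat, Int.eq_natCast_toNat.mpr hy.1⟩
  have hx2 : kx < (pvIds data).length := by omega
  have hy2 : ky < (pvIds data).length := by omega
  simp [pvKey, PySem.List.pyGet?_natCast, List.getElem?_eq_getElem hx2,
    List.getElem?_eq_getElem hy2]

theorem pv_psA_bounds (data : List (String × List Int)) :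
    ∀ p ∈ pvPsA data, 0 ≤ p.1 ∧ p.1 < (pvN data : Int) ∧ 0 ≤ p.2 ∧ p.2 < (pvN data : Int) := by
  rintro ⟨x, y⟩ hp
  rw [pv_memA] at hp
  obtain ⟨hx, hy, -⟩ := hp
  rw [pvR, PySem.List.mem_pyRange_one] at hx hy
  exact ⟨hx.1, hx.2, hy.1, hy.2⟩

theorem pv_psB_bounds (data : List (String × List Int)) :
    ∀ p ∈ pvPsB data, 0 ≤ p.1 ∧ p.1 < (pvN data : Int) ∧ 0 ≤ p.2 ∧ p.2 < (pvN data : Int) := by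
  rintro ⟨x, y⟩ hp
  rw [pv_memB] at hp
  obtain ⟨hx, hy, -⟩ := hp
  rw [pvR, PySem.List.mem_pyRange_one] at hx hy
  exact ⟨hx.1, hx.2, hy.1, hy.2⟩

theorem pv_eq_of_E (n : Nat) (m m' : List (List Bool)) (hm : pvShaped m n) (hm' : pvShaped m' n)
    (h : ∀ i j : Nat, i < n → j < n → pvE m i j = pvE m' i j) : m = m' := by
  obtain ⟨hl, hr⟩ := hm
  obtain ⟨hl', hr'⟩ := hm'
  apply List.ext_getElem (by omega)
  intro i h1 h2
  have hi : i < n := by omega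
  have e1 : m.getD i [] = m[i] := List.getD_eq_getElem m [] h1
  have e2 : m'.getD i [] = m'[i] := List.getD_eq_getElem m' [] h2
  apply List.ext_getElem
  · rw [← e1, ← e2, hr i hi, hr' i hi]
  · intro j hj1 hj2
    have hj : j < n := by rw [← e1, hr i hi] at hj1; exact hj1
    have := h i j hi hj
    rw [pvE, pvE, e1, e2, List.getD_eq_getElem _ _ hj1, List.getD_eq_getElem _ _ hj2] at this
    exact this

-- ===== VERDICT (by name: the statement is the Claim_ definition above) =====
theorem build_word_attn_mask_py_spec : Claim_equal_build_word_attn_mask_py := by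
  intro data hdom hpre
  unfold Spec_build_word_attn_mask_py
  rw [pvA_eq, pvB_eq]
  obtain ⟨-, hpre2⟩ := hpre
  rcases hpre2 with h0 | ⟨-, hlen⟩
  · have hr : pvR data = [] := by
      simp [pvR, pvN, h0, PySem.List.pyRange_one_eq_nil]
    simp [pvPsA, pvPsB, pvGroups, hr, pvApplyF, PySem.Dict.empty]
  · apply pv_eq_of_E (pvN data)
    · exact pvShaped_applyF _ _ (pvShaped_M0 data) _
    · exact pvShaped_applyF _ _ (pvShaped_M0 data) _
    · intro i j hi hj
      rw [pvE_applyF (pvN data) _ (pv_psA_bounds data) _ (pvShaped_M0 data) i j hi hj,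
          pvE_applyF (pvN data) _ (pv_psB_bounds data) _ (pvShaped_M0 data) i j hi hj]
      have := pv_mem_iff data hlen (i : Int) (j : Int)
      simp [this]
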